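-- pv_equiv track=rewrite | github.com/eladmallel/x-digest | src/x_digest/digest.py | split_digest
-- ===== SOURCE A (Python) =====
-- from typing import List, Dict, Any, Optional, Tuple
--
-- MAX_MESSAGE_LENGTH = 4000  # WhatsApp/Telegram safe limit
--
-- def split_digest(
--     digest: str,
--     max_length: int = MAX_MESSAGE_LENGTH,
--     sections: Optional[List[Dict[str, Any]]] = None
-- ) -> List[str]:
--     """
--     Split long digest into multiple messages at section boundaries.
--
--     Args:
--         digest: Full digest text
--         max_length: Maximum length per message
--         sections: Optional list of section dicts with 'emoji' keys for split points
--
--     Returns: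
--         List of message parts, with part indicators if split
--
--     Split priority:
--     1. Section headers (from configured section emojis)
--     2. Any ## header (markdown section)
--     3. Bold item starts (*text*)
--     4. Paragraph breaks
--     5. Hard split (emergency)
--     """
--     if len(digest) <= max_length:
--         return [digest]
--
--     # Build split markers dynamically from configured sections
--     split_markers = []
--     if sections:
--         for section in sections:
--             emoji = section.get("emoji")
--             if emoji:
--                 split_markers.append(f"\n\n{emoji}")
--                 split_markers.append(f"\n\n## {emoji}")
--
--     # Generic fallbacks (works for any section structure)
--     split_markers.extend([
--         "\n\n## ",   # Any markdown section header
--         "\n\n*",     # Any bold item start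
--         "\n\n",      # Paragraph break (fallback)
--     ])
--
--     parts = []
--     remaining = digest
--
--     while len(remaining) > max_length:
--         split_at = None
--
--         # Find best split point before the limit
--         for marker in split_markers:
--             idx = remaining.rfind(marker, 0, max_length)
--             if idx > 0:
--                 split_at = idx
--                 break
--
--         if split_at is None:
--             # Emergency: hard split at limit (subtract part indicator length)
--             split_at = max_length - 10  # Leave room for part indicator
--
--         parts.append(remaining[:split_at].rstrip())
--         remaining = remaining[split_at:].lstrip()
--
--     if remaining:
--         parts.append(remaining)
--
--     # Add part indicators if multiple parts
--     if len(parts) > 1: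
--         total = len(parts)
--         parts = [f"{part}\n\n_({i+1}/{total})_" for i, part in enumerate(parts)]
--
--     return parts
-- ===== SOURCE B (Python) =====
-- MAX_MESSAGE_LENGTH = 4000
--
--
-- def split_digest(digest, max_length=MAX_MESSAGE_LENGTH, sections=None):
--     """Walk an integer offset through `digest`, recording (start, end)
--     bounds of each chunk, and slice only the final pieces instead of
--     recopying the remaining tail each iteration."""
--     if len(digest) <= max_length:
--         return [digest]
--
--     markers = [pre + e
--                for sec in (sections or [])
--                for e in [sec.get("emoji")] if e
--                for pre in ("\n\n", "\n\n## ")]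
--     markers += ["\n\n## ", "\n\n*", "\n\n"]
--
--     if max_length <= 10:
--         raise ValueError("max_length must be greater than 10")
--
--     n = len(digest)
--     lo = 0
--     bounds = []
--     while n - lo > max_length:
--         cut = None
--         for m in markers:
--             j = digest.rfind(m, lo, lo + max_length)
--             if j > lo:
--                 cut = j - lo
--                 break
--         if cut is None:
--             cut = max_length - 10
--         bounds.append((lo, lo + cut))
--         lo += cut
--         while lo < n and digest[lo].isspace():
--             lo += 1
--
--     parts = [digest[s:e].rstrip() for s, e in bounds]
--     if lo < n:
--         parts.append(digest[lo:])
--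
--     if len(parts) > 1:
--         total = len(parts)
--         parts = [f"{part}\n\n_({i+1}/{total})_" for i, part in enumerate(parts)]
--     return parts
-- ===== Notes on version B (the rewrite author's own statement) =====
-- stated objective: alternative
-- what changed: B walks an integer offset through digest, searching each marker window in place and recording (start,end) bounds, slicing only the final pieces, instead of A's re-slicing (and rstrip/lstrip copying) of the whole remaining tail on every iteration; same values, different traversal/data structure.
-- outside the precondition, e.g. on split_digest('a\n\nb', 3, None): A returns ['a\n\n_(1/2)_', 'b\n\n_(2/2)_'], B raises ValueError
import Mathlib
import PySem

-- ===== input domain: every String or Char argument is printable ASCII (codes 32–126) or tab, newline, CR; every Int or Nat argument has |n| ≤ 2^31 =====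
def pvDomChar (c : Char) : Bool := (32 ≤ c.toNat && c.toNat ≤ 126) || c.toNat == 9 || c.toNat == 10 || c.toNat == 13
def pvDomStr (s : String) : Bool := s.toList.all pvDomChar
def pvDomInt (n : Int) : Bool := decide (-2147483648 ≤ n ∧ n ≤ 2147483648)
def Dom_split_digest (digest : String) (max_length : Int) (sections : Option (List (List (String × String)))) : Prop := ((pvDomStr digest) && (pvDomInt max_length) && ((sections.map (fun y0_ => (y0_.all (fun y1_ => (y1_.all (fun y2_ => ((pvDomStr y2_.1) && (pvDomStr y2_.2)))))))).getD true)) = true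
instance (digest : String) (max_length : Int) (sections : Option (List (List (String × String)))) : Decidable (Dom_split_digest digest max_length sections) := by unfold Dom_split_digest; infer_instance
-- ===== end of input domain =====

-- B replaces A's repeated tail re-slicing with an integer offset walked through `digest`
-- plus recorded (start,end) bounds, slicing only the final pieces (objective: alternative).


-- ===== PORT A =====
-- A's dynamic marker list: a fold over `sections` appending two markers per truthy emoji,
-- then the generic fallbacks.
def markersA (sections : Option (List (List (String × String)))) : List (List Char) :=
  (match sections with
    | none => []
    | some secs =>
        secs.foldl (fun acc sec =>
          match PySem.Dict.get? (PySem.Dict.mk sec) "emoji" with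
          | some e =>
              if e ≠ "" then
                acc ++ [['\n','\n'] ++ e.toList, ['\n','\n','#','#',' '] ++ e.toList]
              else acc
          | none => acc) [])
  ++ [['\n','\n','#','#',' '], ['\n','\n','*'], ['\n','\n']]

-- the inner `for marker in split_markers: idx = remaining.rfind(marker, 0, max_length); if idx > 0: break`
def findSplitA (remaining : List Char) (ml : Int) : List (List Char) → Option Int
  | [] => none
  | m :: rest =>
      let idx := PySem.Chars.rfindFrom remaining m 0 (some ml)
      if 0 < idx then some idx else findSplitA remaining ml rest

-- f"{part}\n\n_({i}/{total})_" suffix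
def tagA (i total : Int) : List Char :=
  ['\n','\n','_','('] ++ (PySem.Int.toStr i).toList ++ ['/'] ++ (PySem.Int.toStr total).toList ++ [')','_']

-- the `while len(remaining) > max_length` loop; fuel = |digest| suffices on Pre_ (each
-- iteration shortens `remaining` by at least one character when max_length ≥ 11)
def loopA (ml : Int) (markers : List (List Char)) :
    Nat → List Char → List (List Char) → List (List Char) × List Char
  | 0, remaining, parts => (parts, remaining)
  | fuel+1, remaining, parts =>
      if ml < (remaining.length : Int) then
        let splitAt := (findSplitA remaining ml markers).getD (ml - 10)
        let part := PySem.Chars.rstrip (PySem.List.slice remaining none (some splitAt))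
        let rest := PySem.Chars.lstrip (PySem.List.slice remaining (some splitAt) none)
        loopA ml markers fuel rest (parts ++ [part])
      else (parts, remaining)

def split_digest (digest : String) (max_length : Int) (sections : Option (List (List (String × String)))) : List String :=
  if (digest.toList.length : Int) ≤ max_length then [digest]
  else
    let markers := markersA sections
    let pr := loopA max_length markers digest.toList.length digest.toList []
    let parts := if pr.2 ≠ [] then pr.1 ++ [pr.2] else pr.1
    if 1 < parts.length then
      (PySem.List.enumerate parts).map (fun ip => String.ofList (ip.2 ++ tagA (ip.1 + 1) parts.length))
    else parts.map String.ofList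

-- ===== PORT B =====
-- B's marker list: one flat comprehension over `sections`, then the generic fallbacks.
def markersB (sections : Option (List (List (String × String)))) : List (List Char) :=
  ((sections.getD []).flatMap (fun sec =>
      match PySem.Dict.get? (PySem.Dict.mk sec) "emoji" with
      | some e =>
          if e ≠ "" then [['\n','\n'] ++ e.toList, ['\n','\n','#','#',' '] ++ e.toList]
          else []
      | none => []))
  ++ [['\n','\n','#','#',' '], ['\n','\n','*'], ['\n','\n']]

-- `next((j - lo for m in markers if (j := digest.rfind(m, lo, lo + max_length)) > lo), None)`
def findCutB (d : List Char) (lo : Int) (ml : Int) : List (List Char) → Option Int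
  | [] => none
  | m :: rest =>
      let j := PySem.Chars.rfindFrom d m lo (some (lo + ml))
      if lo < j then some (j - lo) else findCutB d lo ml rest

-- `while lo < n and digest[lo].isspace(): lo += 1` (isspace on a single char)
def skipWS (d : List Char) (lo : Nat) : Nat :=
  if h : lo < d.length then
    if PySem.Chars.isspace d[lo] then skipWS d (lo + 1) else lo
  else lo
termination_by d.length - lo

-- the `while n - lo > max_length` loop over an offset, recording bounds only
def loopB (d : List Char) (ml : Int) (markers : List (List Char)) :
    Nat → Nat → List (Nat × Nat) → List (Nat × Nat) × Nat
  | 0, lo, bounds => (bounds, lo)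
  | fuel+1, lo, bounds =>
      if ml < (d.length : Int) - lo then
        let cut := ((findCutB d lo ml markers).getD (ml - 10)).toNat
        loopB d ml markers fuel (skipWS d (lo + cut)) (bounds ++ [(lo, lo + cut)])
      else (bounds, lo)

def split_digest_alt (digest : String) (max_length : Int) (sections : Option (List (List (String × String)))) : List String :=
  if (digest.toList.length : Int) ≤ max_length then [digest]
  else
    let d := digest.toList
    let markers := markersB sections
    if max_length ≤ 10 then [] -- Python B raises ValueError here; outside Pre_
    else
      let bl := loopB d max_length markers d.length 0 []
      let parts :=
        bl.1.map (fun se => PySem.Chars.rstrip ((d.drop se.1).take (se.2 - se.1)))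
        ++ (if bl.2 < d.length then [d.drop bl.2] else [])
      if 1 < parts.length then
        (PySem.List.enumerate parts).map (fun ip => String.ofList (ip.2 ++
          (['\n','\n','_','('] ++ (PySem.Int.toStr (ip.1 + 1)).toList ++ ['/']
            ++ (PySem.Int.toStr parts.length).toList ++ [')','_'])))
      else parts.map String.ofList

-- ===== PRECONDITION & SPEC =====
-- Pre_ excludes digests longer than max_length when max_length ≤ 10: there A's emergency
-- split (max_length - 10) makes no forward progress, so A loops forever on most such inputs
-- and any value it does return arises through a negative-slice accident; B raises ValueError.
def Pre_split_digest (digest : String) (max_length : Int) (sections : Option (List (List (String × String)))) : Prop :=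
  (digest.toList.length : Int) ≤ max_length ∨ 11 ≤ max_length
instance (digest : String) (max_length : Int) (sections : Option (List (List (String × String)))) : Decidable (Pre_split_digest digest max_length sections) := by unfold Pre_split_digest; infer_instance

def pvWitness_split_digest : String × Int × (Option (List (List (String × String)))) := ("ab", 20, none)

def Spec_split_digest (digest : String) (max_length : Int) (sections : Option (List (List (String × String)))) (out : List String) : Prop := out = split_digest_alt digest max_length sections
instance (digest : String) (max_length : Int) (sections : Option (List (List (String × String)))) (out : List String) : Decidable (Spec_split_digest digest max_length sections out) := by unfold Spec_split_digest; infer_instance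

-- ===== CLAIM (what is proved, stated in full; the proofs are below) =====
def Claim_equal_split_digest : Prop := ∀ (digest : String) (max_length : Int) (sections : Option (List (List (String × String)))), Dom_split_digest digest max_length sections → Pre_split_digest digest max_length sections → Spec_split_digest digest max_length sections (split_digest digest max_length sections)

-- ===== LEMMAS AND PROOFS =====

theorem markers_fold_eq (secs : List (List (String × String))) (acc : List (List Char)) :
    secs.foldl (fun acc sec =>
      match PySem.Dict.get? (PySem.Dict.mk sec) "emoji" with
      | some e =>
          if e = "" then acc
          else acc ++ ['\n' :: '\n' :: e.toList, '\n' :: '\n' :: '#' :: '#' :: ' ' :: e.toList]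
      | none => acc) acc
    = acc ++ secs.flatMap (fun sec =>
        match PySem.Dict.get? (PySem.Dict.mk sec) "emoji" with
        | some e =>
            if e = "" then []
            else ['\n' :: '\n' :: e.toList, '\n' :: '\n' :: '#' :: '#' :: ' ' :: e.toList]
        | none => []) := by
  induction secs generalizing acc with
  | nil => simp
  | cons sec rest ih =>
      rw [List.foldl_cons, List.flatMap_cons]
      cases h : PySem.Dict.get? (PySem.Dict.mk sec) "emoji" with
      | none => simp only [h]; rw [ih]; simp
      | some e =>
          simp only [h]
          by_cases he : e = ""
          · rw [if_pos he, if_pos he, ih]; simp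
          · rw [if_neg he, if_neg he, ih, List.append_assoc]

theorem markers_eq (sections : Option (List (List (String × String)))) :
    markersA sections = markersB sections := by
  cases sections with
  | none => rfl
  | some secs =>
      simp [markersA, markersB]
      have := markers_fold_eq secs []
      simpa using this

theorem rfind_go_le (s sub : List Char) (k : Nat) : PySem.Chars.rfind.go s sub k ≤ k := by
  induction k with
  | zero => simp [PySem.Chars.rfind.go]; split <;> simp
  | succ j ih =>
      rw [PySem.Chars.rfind.go]
      split
      · exact le_refl _
      · exact le_trans ih (by omega)

theorem rfind_le_length (s sub : List Char) : PySem.Chars.rfind s sub ≤ s.length :=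
  rfind_go_le s sub s.length

theorem rfindFrom_zero_window (s m : List Char) (ml : Int)
    (h0 : 0 ≤ ml) (h : ml < (s.length : Int)) :
    PySem.Chars.rfindFrom s m 0 (some ml) = PySem.Chars.rfind (s.take ml.toNat) m := by
  simp only [PySem.Chars.rfindFrom]
  have he : (if (s.length : Int) < ml then (s.length : Int)
             else if ml < 0 then (if ml + s.length < 0 then 0 else ml + s.length) else ml) = ml := by
    split_ifs <;> omega
  rw [he, if_neg (by omega : ¬((0:Int) < 0)), if_neg (by omega : ¬(ml < (0:Int)))]
  simp only [Int.toNat_zero, List.drop_zero, zero_add]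
  split <;> omega

theorem rfindFrom_shift (d m : List Char) (lo : Nat) (ml : Int)
    (h0 : 0 ≤ ml) (h : (lo : Int) + ml < (d.length : Int)) :
    PySem.Chars.rfindFrom d m (lo : Int) (some ((lo : Int) + ml)) =
      (if PySem.Chars.rfind ((d.drop lo).take ml.toNat) m = -1 then -1
       else (lo : Int) + PySem.Chars.rfind ((d.drop lo).take ml.toNat) m) := by
  simp only [PySem.Chars.rfindFrom]
  have he : (if (d.length : Int) < (lo : Int) + ml then (d.length : Int)
             else if (lo : Int) + ml < 0 then (if (lo : Int) + ml + d.length < 0 then 0 else (lo : Int) + ml + d.length)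
             else (lo : Int) + ml) = (lo : Int) + ml := by
    split_ifs <;> omega
  rw [he, if_neg (by omega : ¬((lo : Int) < 0)), if_neg (by omega : ¬((lo : Int) + ml < (lo : Int)))]
  have key : List.drop ((lo : Int)).toNat (List.take ((lo : Int) + ml).toNat d)
      = List.take ml.toNat (List.drop lo d) := by
    rw [show ((lo : Int)).toNat = lo by omega, show ((lo : Int) + ml).toNat = lo + ml.toNat by omega,
       List.drop_take, show lo + ml.toNat - lo = ml.toNat by omega]
  rw [key]

theorem findCut_eq (d : List Char) (lo : Nat) (ml : Int)
    (h0 : 0 ≤ ml) (h : (lo : Int) + ml < (d.length : Int)) :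
    ∀ markers, findCutB d (lo : Int) ml markers = findSplitA (d.drop lo) ml markers := by
  intro markers
  induction markers with
  | nil => rfl
  | cons m rest ih =>
      simp only [findCutB, findSplitA]
      rw [rfindFrom_shift d m lo ml h0 h,
          rfindFrom_zero_window (d.drop lo) m ml h0 (by simp [List.length_drop]; omega)]
      by_cases hr : PySem.Chars.rfind ((d.drop lo).take ml.toNat) m = -1
      · rw [if_pos hr, if_neg (by omega : ¬ (lo : Int) < -1), hr,
            if_neg (by omega : ¬ (0:Int) < -1), ih]
      · rw [if_neg hr]
        by_cases hp : 0 < PySem.Chars.rfind ((d.drop lo).take ml.toNat) m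
        · rw [if_pos (by omega), if_pos hp]
          simp
        · rw [if_neg (by omega), if_neg hp, ih]

theorem findSplitA_bounds (rem : List Char) (ml : Int) (h0 : 0 ≤ ml)
    (hml : ml < (rem.length : Int)) :
    ∀ markers idx, findSplitA rem ml markers = some idx → 0 < idx ∧ idx ≤ ml := by
  intro markers
  induction markers with
  | nil => intro idx h; simp [findSplitA] at h
  | cons m rest ih =>
      intro idx h
      simp only [findSplitA] at h
      split at h
      · rename_i hpos
        cases h
        refine ⟨hpos, ?_⟩
        rw [rfindFrom_zero_window rem m ml h0 hml] at hpos ⊢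
        have h1 := rfind_le_length (rem.take ml.toNat) m
        have h2 : (rem.take ml.toNat).length ≤ ml.toNat := by simp
        omega
      · exact ih idx h

theorem drop_skipWS (d : List Char) (lo : Nat) :
    d.drop (skipWS d lo) = PySem.Chars.lstrip (d.drop lo) := by
  rw [skipWS]
  split
  · rename_i hlt
    split
    · rename_i hsp
      rw [drop_skipWS d (lo + 1)]
      simp only [PySem.Chars.lstrip]
      conv_rhs => rw [List.drop_eq_getElem_cons hlt, List.dropWhile_cons]
      rw [if_pos hsp]
    · rename_i hsp
      simp only [PySem.Chars.lstrip]
      conv_rhs => rw [List.drop_eq_getElem_cons hlt, List.dropWhile_cons]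
      rw [if_neg hsp]
      exact List.drop_eq_getElem_cons hlt
  · rename_i hge
    have h0 : d.drop lo = [] := List.drop_eq_nil_of_le (by omega)
    simp [h0, PySem.Chars.lstrip]
termination_by d.length - lo

theorem skipWS_le (d : List Char) (lo : Nat) (h : lo ≤ d.length) : skipWS d lo ≤ d.length := by
  rw [skipWS]
  split
  · split
    · exact skipWS_le d (lo + 1) (by rename_i hlt _; omega)
    · exact h
  · exact h
termination_by d.length - lo

def partOf (d : List Char) (se : Nat × Nat) : List Char :=
  PySem.Chars.rstrip ((d.drop se.1).take (se.2 - se.1))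

theorem loop_eq (d : List Char) (markers : List (List Char)) (ml : Int) (hml : 11 ≤ ml) :
    ∀ fuel (lo : Nat) (bounds : List (Nat × Nat)), lo ≤ d.length →
      loopA ml markers fuel (d.drop lo) (bounds.map (partOf d)) =
        ((loopB d ml markers fuel lo bounds).1.map (partOf d),
         d.drop (loopB d ml markers fuel lo bounds).2) := by
  intro fuel
  induction fuel with
  | zero => intro lo bounds _; simp [loopA, loopB]
  | succ n ih =>
      intro lo bounds hlo
      have hlen : ((d.drop lo).length : Int) = (d.length : Int) - lo := by
        simp [List.length_drop]; omega
      by_cases hc : ml < ((d.drop lo).length : Int)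
      · have hc' : ml < (d.length : Int) - (lo : Int) := by omega
        have hwin : (lo : Int) + ml < (d.length : Int) := by omega
        -- the chosen split point, shared by both sides
        have hfind := findCut_eq d lo ml (by omega) hwin markers
        set optA := findSplitA (d.drop lo) ml markers with hoptA
        have hsb : 0 < optA.getD (ml - 10) ∧ optA.getD (ml - 10) ≤ ml := by
          cases h : optA with
          | none => simp; omega
          | some idx =>
              have := findSplitA_bounds (d.drop lo) ml (by omega) hc markers idx (hoptA ▸ h)
              simp [this.1, this.2]
        set sAt := optA.getD (ml - 10) with hsAt
        have hcut : sAt.toNat ≤ ml.toNat := by omega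
        have hlt : lo + sAt.toNat < d.length := by
          have : ml < ((d.drop lo).length : Int) := hc
          simp [List.length_drop] at this
          omega
        simp only [loopA, loopB, if_pos hc, if_pos hc']
        rw [hfind, ← hoptA, ← hsAt]
        rw [PySem.List.slice_to _ (by omega : (0:Int) ≤ sAt),
            PySem.List.slice_from _ (by omega : (0:Int) ≤ sAt)]
        have hdd : (d.drop lo).drop sAt.toNat = d.drop (lo + sAt.toNat) := by
          rw [List.drop_drop, Nat.add_comm]
        have hrest : PySem.Chars.lstrip ((d.drop lo).drop sAt.toNat)
            = d.drop (skipWS d (lo + sAt.toNat)) := by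
          rw [hdd, drop_skipWS]
        rw [hrest]
        have hmap : bounds.map (partOf d) ++ [PySem.Chars.rstrip ((d.drop lo).take sAt.toNat)]
            = (bounds ++ [(lo, lo + sAt.toNat)]).map (partOf d) := by
          simp [partOf]
        rw [hmap]
        exact ih (skipWS d (lo + sAt.toNat)) (bounds ++ [(lo, lo + sAt.toNat)])
          (skipWS_le d _ (by omega))
      · have hc' : ¬ ml < (d.length : Int) - (lo : Int) := by omega
        simp only [loopA, loopB]
        rw [if_neg hc, if_neg hc']

-- ===== VERDICT (by name: the statement is the Claim_ definition above) =====
theorem split_digest_spec : Claim_equal_split_digest := by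
  unfold Claim_equal_split_digest
  intro digest ml sections _ hpre
  unfold Spec_split_digest
  by_cases hlen : (digest.toList.length : Int) ≤ ml
  · have hlen' : ((digest.length : Nat) : Int) ≤ ml := by simpa using hlen
    simp [split_digest, split_digest_alt, hlen']
  · have hml : 11 ≤ ml := by
      cases hpre with
      | inl h => exact absurd h hlen
      | inr h => exact h
    simp only [split_digest, split_digest_alt, if_neg hlen, if_neg (by omega : ¬ ml ≤ 10)]
    rw [markers_eq]
    have hloop := loop_eq digest.toList (markersB sections) ml hml digest.toList.length 0 [] (by omega)
    simp only [List.drop_zero, List.map_nil] at hloop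
    rw [hloop]
    set bl := loopB digest.toList ml (markersB sections) digest.toList.length 0 [] with hbl
    have htail : (digest.toList.drop bl.2 ≠ []) ↔ (bl.2 < digest.toList.length) := by
      rw [ne_eq, List.drop_eq_nil_iff]
      omega
    have hp : partOf digest.toList
        = fun se => PySem.Chars.rstrip (List.take (se.2 - se.1) (List.drop se.1 digest.toList)) := rfl
    by_cases ht : bl.2 < digest.toList.length
    · simp only [if_pos ht, if_pos (htail.mpr ht), hp, tagA]
    · simp only [if_neg ht, if_neg (fun hne => ht (htail.mp hne)), hp, tagA, List.append_nil]
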